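-- pv_equiv track=rewrite | github.com/jwater000/salt-verification-console | tools/evaluation/expand_cosmic_frozen_samples.py | dedupe_and_select
-- ===== SOURCE A (Python) =====
-- def dedupe_and_select(rows: list[dict], target: int) -> list[dict]:
--     by_event: dict[str, dict] = {}
--     for r in rows:
--         event_id = str(r.get("event_id", "")).strip()
--         current = by_event.get(event_id)
--         if current is None:
--             by_event[event_id] = r
--             continue
--         prev_t = str(current.get("event_time_utc") or "")
--         next_t = str(r.get("event_time_utc") or "")
--         if next_t > prev_t:
--             by_event[event_id] = r
--
--     out = list(by_event.values())
--     out.sort(key=lambda x: (str(x.get("event_time_utc") or ""), str(x.get("event_id") or "")), reverse=True)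
--     return out[:target]
-- ===== SOURCE B (Python) =====
-- def dedupe_and_select(rows: list[dict], target: int) -> list[dict]:
--     # Group rows by stripped event_id, then reduce each group with max
--     # (first maximal by time, matching the running-max's first-seen rule).
--     groups: dict[str, list[dict]] = {}
--     for r in rows:
--         groups.setdefault(str(r.get("event_id", "")).strip(), []).append(r)
--     survivors = [max(g, key=lambda r: str(r.get("event_time_utc") or ""))
--                  for g in groups.values()]
--     survivors.sort(key=lambda x: (str(x.get("event_time_utc") or ""), str(x.get("event_id") or "")), reverse=True)
--     return survivors[:target]
-- ===== Notes on version B (the rewrite author's own statement) =====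
-- stated objective: alternative
-- what changed: Replaces the running-max dedup (one dict slot per id, overwritten when a later time is larger) by group-then-reduce: a dict of lists per stripped event_id built with setdefault, each group reduced with max(key=time) (first maximal), then the same descending sort and slice.
import Mathlib
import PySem

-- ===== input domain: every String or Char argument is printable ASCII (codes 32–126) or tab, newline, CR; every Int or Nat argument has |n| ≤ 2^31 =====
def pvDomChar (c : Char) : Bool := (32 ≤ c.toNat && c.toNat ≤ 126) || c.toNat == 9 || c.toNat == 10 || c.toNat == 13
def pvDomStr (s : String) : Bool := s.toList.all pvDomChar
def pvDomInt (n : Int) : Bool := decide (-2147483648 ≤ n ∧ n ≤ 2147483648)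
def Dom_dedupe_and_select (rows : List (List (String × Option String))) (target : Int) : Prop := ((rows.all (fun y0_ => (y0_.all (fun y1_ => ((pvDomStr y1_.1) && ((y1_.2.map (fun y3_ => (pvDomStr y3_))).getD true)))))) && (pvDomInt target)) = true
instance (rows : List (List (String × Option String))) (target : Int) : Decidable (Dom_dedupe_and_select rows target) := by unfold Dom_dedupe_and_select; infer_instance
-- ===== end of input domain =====

-- B replaces A's running-max dedup with a group-by-id then reduce-with-max decomposition
-- (objective: alternative; same asymptotic cost).

-- shared key helpers: both Pythons contain these identical expressions
-- str(v) for v : Optional[str]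
def pvStrOf (v : Option String) : String :=
  match v with
  | none => "None"
  | some s => s

-- str(r.get("event_id", "")).strip()
def pvEidKey (r : List (String × Option String)) : String :=
  PySem.Str.strip (pvStrOf (((PySem.Dict.mk r).get? "event_id").getD (some "")))

-- str(r.get("event_time_utc") or "")
def pvTimeKey (r : List (String × Option String)) : String :=
  (((PySem.Dict.mk r).get? "event_time_utc").getD none).getD ""

-- str(r.get("event_id") or "")
def pvIdKey (r : List (String × Option String)) : String :=
  (((PySem.Dict.mk r).get? "event_id").getD none).getD ""

-- ===== PORT A =====
def dedupe_and_select (rows : List (List (String × Option String))) (target : Int) : List (List (String × Option String)) :=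
  let by_event :=
    rows.foldl (fun d r =>
      let event_id := pvEidKey r
      match d.get? event_id with
      | none => d.insert event_id r
      | some current =>
        let prev_t := pvTimeKey current
        let next_t := pvTimeKey r
        if prev_t < next_t then d.insert event_id r else d)
      (PySem.Dict.empty : PySem.Dict String (List (String × Option String)))
  let out := by_event.values
  let out := PySem.List.sorted2 out pvTimeKey pvIdKey true
  PySem.List.slice out none (some target)

-- ===== PORT B =====
def dedupe_and_select_alt (rows : List (List (String × Option String))) (target : Int) : List (List (String × Option String)) :=
  let groups :=
    rows.foldl (fun g r => g.modify (pvEidKey r) [] (fun l => l ++ [r]))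
      (PySem.Dict.empty : PySem.Dict String (List (List (String × Option String))))
  let survivors := groups.values.map (fun g => (PySem.List.max? g pvTimeKey).getD [])
  let survivors := PySem.List.sorted2 survivors pvTimeKey pvIdKey true
  PySem.List.slice survivors none (some target)

-- ===== PRECONDITION & SPEC =====
def Spec_dedupe_and_select (rows : List (List (String × Option String))) (target : Int) (out : List (List (String × Option String))) : Prop := out = dedupe_and_select_alt rows target
instance (rows : List (List (String × Option String))) (target : Int) (out : List (List (String × Option String))) : Decidable (Spec_dedupe_and_select rows target out) := by unfold Spec_dedupe_and_select; infer_instance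

-- ===== CLAIM (what is proved, stated in full; the proofs are below) =====
def Claim_equal_dedupe_and_select : Prop := ∀ (rows : List (List (String × Option String))) (target : Int), Dom_dedupe_and_select rows target → Spec_dedupe_and_select rows target (dedupe_and_select rows target)


-- ===== LEMMAS AND PROOFS =====

-- the reduction B applies to one group
def pvRed (l : List (List (String × Option String))) : List (String × Option String) :=
  (PySem.List.max? l pvTimeKey).getD []

-- the pointwise item relation between A's dict and B's dict
def pvF (p : String × List (List (String × Option String))) : String × List (String × Option String) :=
  (p.1, pvRed p.2)

theorem pvFind_map_F (e : String) (lb : List (String × List (List (String × Option String)))) :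
    List.find? (fun p => p.1 == e) (lb.map pvF) = (List.find? (fun p => p.1 == e) lb).map pvF := by
  induction lb with
  | nil => rfl
  | cons q t ih =>
    simp only [List.map_cons, List.find?]
    by_cases h : (q.1 == e) = true
    · simp [pvF, h]
    · simp [pvF, h, ih]

theorem pvMax?_of_ne_nil (l : List (List (String × Option String))) (hl : l ≠ []) :
    ∃ c, PySem.List.max? l pvTimeKey = some c := by
  cases h : PySem.List.max? l pvTimeKey with
  | none => exact absurd ((PySem.List.max?_eq_none_iff l pvTimeKey).mp h) hl
  | some c => exact ⟨c, rfl⟩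

theorem pvRed_append (l : List (List (String × Option String))) (r : List (String × Option String))
    (c : List (String × Option String)) (hc : PySem.List.max? l pvTimeKey = some c) :
    pvRed (l ++ [r]) = if pvTimeKey c < pvTimeKey r then r else c := by
  unfold pvRed PySem.List.max?
  rw [List.foldl_append]
  unfold PySem.List.max? at hc
  rw [hc]
  simp only [List.foldl]
  split_ifs <;> simp

theorem pvRepl_id (e : String) (c : List (String × Option String))
    (la : List (String × List (String × Option String)))
    (hN : (la.map Prod.fst).Nodup)
    (hf : List.find? (fun p => p.1 == e) la = some (e, c)) :
    la.map (fun p => if p.1 == e then (e, c) else p) = la := by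
  induction la with
  | nil => simp at hf
  | cons q t ih =>
    simp only [List.map_cons, List.nodup_cons] at hN
    simp only [List.find?] at hf
    by_cases h : (q.1 == e) = true
    · simp only [h] at hf
      simp only [List.map_cons, h, if_true, List.cons.injEq]
      injection hf with hq
      refine ⟨hq.symm, ?_⟩
      have he : q.1 = e := by simpa using h
      have hnot : ∀ p ∈ t, ¬ (p.1 == e) = true := by
        intro p hp hpe
        exact hN.1 (by
          rw [he]
          exact List.mem_map.mpr ⟨p, hp, by simpa using hpe⟩)
      calc t.map (fun p => if p.1 == e then (e, c) else p) = t.map id := by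
              apply List.map_congr_left; intro p hp; simp [hnot p hp]
        _ = t := List.map_id t
    · simp only [h] at hf
      simp only [List.map_cons, h, Bool.false_eq_true, if_false, List.cons.injEq]
      exact ⟨trivial, ih hN.2 hf⟩

-- one loop step preserves the relation (A's dict items = map pvF of B's dict items),
-- plus nodup keys and nonempty groups
theorem pvStep_rel (r : List (String × Option String))
    (lb : List (String × List (List (String × Option String))))
    (hN : (lb.map Prod.fst).Nodup) (hNE : ∀ p ∈ lb, p.2 ≠ []) :
    (let event_id := pvEidKey r
     match (PySem.Dict.mk (lb.map pvF)).get? event_id with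
     | none => (PySem.Dict.mk (lb.map pvF)).insert event_id r
     | some current =>
       if pvTimeKey current < pvTimeKey r then (PySem.Dict.mk (lb.map pvF)).insert event_id r
       else PySem.Dict.mk (lb.map pvF)).items
    = ((PySem.Dict.mk lb).modify (pvEidKey r) [] (fun l => l ++ [r])).items.map pvF
    ∧ (((PySem.Dict.mk lb).modify (pvEidKey r) [] (fun l => l ++ [r])).items.map Prod.fst).Nodup
    ∧ ∀ p ∈ ((PySem.Dict.mk lb).modify (pvEidKey r) [] (fun l => l ++ [r])).items, p.2 ≠ [] := by
  set e := pvEidKey r with he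
  have hfind := pvFind_map_F e lb
  cases hq : List.find? (fun p => p.1 == e) lb with
  | none =>
    -- new key: both dicts append an entry
    have hc : ((PySem.Dict.mk lb).contains e) = false := by
      simp only [PySem.Dict.contains, List.any_eq_false]
      intro p hp
      have := List.find?_eq_none.mp hq p hp
      simpa using this
    have hca : ((PySem.Dict.mk (lb.map pvF)).contains e) = false := by
      simp only [PySem.Dict.contains, List.any_eq_false, List.mem_map]
      rintro p ⟨p0, hp0, rfl⟩
      have := List.find?_eq_none.mp hq p0 hp0
      simpa [pvF] using this
    have hget : (PySem.Dict.mk (lb.map pvF)).get? e = none := by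
      simp [PySem.Dict.get?, hfind, hq]
    have hgetb : (PySem.Dict.mk lb).get? e = none := by simp [PySem.Dict.get?, hq]
    have hnm : e ∉ lb.map Prod.fst := by
      intro hmem
      rcases List.mem_map.mp hmem with ⟨p, hp, hpe⟩
      have := List.find?_eq_none.mp hq p hp
      simp [hpe] at this
    have hBitems : ((PySem.Dict.mk lb).modify e [] (fun l => l ++ [r])).items
        = lb ++ [(e, [r])] := by
      simp [PySem.Dict.modify, PySem.Dict.insert, PySem.Dict.getD, hgetb, hc]
    refine ⟨?_, ?_, ?_⟩
    · simp only [hget, hBitems, List.map_append]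
      simp [PySem.Dict.insert, hca, pvF, pvRed, PySem.List.max?]
    · rw [hBitems]
      simp only [List.map_append, List.map_cons, List.map_nil]
      exact List.Nodup.append hN (by simp) (by simpa [List.disjoint_right] using hnm)
    · intro p hp
      rw [hBitems] at hp
      rcases List.mem_append.mp hp with h | h
      · exact hNE p h
      · simp at h; simp [h]
  | some q =>
    -- existing key: B appends r to q's group, A keeps the group's running max
    have hq1 : q.1 = e := by
      have := List.find?_some hq
      simpa using this
    have hqmem : q ∈ lb := List.mem_of_find?_eq_some hq
    have hq2ne : q.2 ≠ [] := hNE q hqmem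
    have hc : ((PySem.Dict.mk lb).contains e) = true := by
      simp only [PySem.Dict.contains, List.any_eq_true]
      exact ⟨q, hqmem, by simp [hq1]⟩
    have hca : ((PySem.Dict.mk (lb.map pvF)).contains e) = true := by
      simp only [PySem.Dict.contains, List.any_eq_true]
      exact ⟨pvF q, List.mem_map.mpr ⟨q, hqmem, rfl⟩, by simp [pvF, hq1]⟩
    have hget : (PySem.Dict.mk (lb.map pvF)).get? e = some (pvRed q.2) := by
      simp [PySem.Dict.get?, hfind, hq, pvF]
    have hgetb : (PySem.Dict.mk lb).get? e = some q.2 := by simp [PySem.Dict.get?, hq]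
    rcases pvMax?_of_ne_nil q.2 hq2ne with ⟨c, hcmax⟩
    have hcred : pvRed q.2 = c := by simp [pvRed, hcmax]
    have hBitems : ((PySem.Dict.mk lb).modify e [] (fun l => l ++ [r])).items
        = lb.map (fun p => if p.1 == e then (e, q.2 ++ [r]) else p) := by
      simp [PySem.Dict.modify, PySem.Dict.insert, PySem.Dict.getD, hgetb, hc]
    have hcomm : (lb.map (fun p => if p.1 == e then (e, q.2 ++ [r]) else p)).map pvF
        = (lb.map pvF).map (fun p => if p.1 == e then (e, pvRed (q.2 ++ [r])) else p) := by
      rw [List.map_map, List.map_map]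
      apply List.map_congr_left
      intro p _
      by_cases h : (p.1 == e) = true <;> simp [Function.comp, pvF, h]
    have hredapp := pvRed_append q.2 r c hcmax
    have hNa : ((lb.map pvF).map Prod.fst).Nodup := by
      rw [List.map_map]
      exact hN
    have hfa : List.find? (fun p => p.1 == e) (lb.map pvF) = some (e, c) := by
      rw [hfind, hq]
      simp [pvF, hq1, hcred]
    refine ⟨?_, ?_, ?_⟩
    · simp only [hget, hcred]
      rw [hBitems, hcomm]
      simp only [hredapp]
      by_cases hlt : pvTimeKey c < pvTimeKey r
      · simp only [hlt, if_true]
        simp [PySem.Dict.insert, hca]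
      · simp only [hlt, if_false]
        exact (pvRepl_id e c (lb.map pvF) hNa hfa).symm
    · rw [hBitems, List.map_map]
      have hfst : lb.map (Prod.fst ∘ (fun p : String × List (List (String × Option String)) =>
            if p.1 == e then (e, q.2 ++ [r]) else p)) = lb.map Prod.fst := by
        apply List.map_congr_left
        intro p _
        by_cases h : (p.1 == e) = true
        · have : p.1 = e := by simpa using h
          simp [Function.comp, this]
        · simp [Function.comp, h]
      rw [hfst]
      exact hN
    · intro p hp
      rw [hBitems] at hp
      rcases List.mem_map.mp hp with ⟨p0, hp0, hpeq⟩
      by_cases h : (p0.1 == e) = true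
      · rw [if_pos h] at hpeq; rw [← hpeq]; simp
      · rw [if_neg h] at hpeq; rw [← hpeq]; exact hNE p0 hp0

-- the loop invariant over the whole row list
theorem pvFold_rel (rows : List (List (String × Option String)))
    (lb : List (String × List (List (String × Option String))))
    (hN : (lb.map Prod.fst).Nodup) (hNE : ∀ p ∈ lb, p.2 ≠ []) :
    (rows.foldl (fun d r =>
      let event_id := pvEidKey r
      match d.get? event_id with
      | none => d.insert event_id r
      | some current =>
        if pvTimeKey current < pvTimeKey r then d.insert event_id r else d)
      (PySem.Dict.mk (lb.map pvF))).items
    = ((rows.foldl (fun g r => g.modify (pvEidKey r) [] (fun l => l ++ [r]))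
        (PySem.Dict.mk lb)).items).map pvF := by
  induction rows generalizing lb with
  | nil => simp
  | cons r t ih =>
    have hstep := pvStep_rel r lb hN hNE
    simp only [List.foldl]
    have heq : (let event_id := pvEidKey r
      match (PySem.Dict.mk (lb.map pvF)).get? event_id with
      | none => (PySem.Dict.mk (lb.map pvF)).insert event_id r
      | some current =>
        if pvTimeKey current < pvTimeKey r then (PySem.Dict.mk (lb.map pvF)).insert event_id r
        else PySem.Dict.mk (lb.map pvF))
      = PySem.Dict.mk ((((PySem.Dict.mk lb).modify (pvEidKey r) [] (fun l => l ++ [r])).items).map pvF) := by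
      exact congrArg PySem.Dict.mk hstep.1
    rw [heq]
    exact ih (((PySem.Dict.mk lb).modify (pvEidKey r) [] (fun l => l ++ [r])).items) hstep.2.1 hstep.2.2

-- ===== VERDICT (by name: the statement is the Claim_ definition above) =====
theorem dedupe_and_select_spec : Claim_equal_dedupe_and_select := by
  intro rows target _
  unfold Spec_dedupe_and_select dedupe_and_select dedupe_and_select_alt
  have h := pvFold_rel rows [] (by simp) (by simp)
  simp only [List.map_nil] at h
  have hvals : (rows.foldl (fun d r =>
      let event_id := pvEidKey r
      match d.get? event_id with
      | none => d.insert event_id r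
      | some current =>
        if pvTimeKey current < pvTimeKey r then d.insert event_id r else d)
      (PySem.Dict.empty : PySem.Dict String (List (String × Option String)))).values
      = ((rows.foldl (fun g r => g.modify (pvEidKey r) [] (fun l => l ++ [r]))
        (PySem.Dict.empty : PySem.Dict String (List (List (String × Option String))))).values).map
          (fun g => (PySem.List.max? g pvTimeKey).getD []) := by
    simp only [PySem.Dict.values]
    rw [show (PySem.Dict.empty : PySem.Dict String (List (String × Option String))) = PySem.Dict.mk [] from rfl] at *
    rw [h, List.map_map, List.map_map]
    rfl
  simp only [hvals]
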